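-- pv_equiv track=rewrite | github.com/gmontoya37693/VScodeCumberlands | assignment_4_4.py | fuzzyMatchesOnly
-- ===== SOURCE A (Python) =====
-- def allMatchesIndices(srch_str, sub_str):
--     """
--     Finds all start indices of occurrences of sub_str in srch_str.
--     Returns a tuple of indices.
--     """
--     indices = []
--     start = 0
--     while True:
--         pos = srch_str.find(sub_str, start)
--         if pos == -1:
--             break
--         indices.append(pos)
--         start = pos + 1
--     return tuple(indices)
--
-- def fuzzyMatchesOnly(srch_str, sub_str):
--     """
--     Returns a tuple of start positions of fuzzy matches (one wildcard)
--     Does not include exact matches.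
--     Arguments:
--         srch_str: string to search
--         sub_str: substring to find fuzzy matches for
--     Returns:
--         tuple of fuzzy match start positions (excluding exact matches)
--     """
--     fuzzy_indices = set()           # Define a set to avoid duplicates
--     chars = set(srch_str)           # Secure unique characters in the search
--     for i in range(len(sub_str)):   # Loop through each character in sub_str
--         for c in chars:             # Loop through each character in srch_str
--             if c != sub_str[i]:
--                 # Create a candidate substring with one character replaced
--                 candidate = sub_str[:i] + c + sub_str[i+1:]
--                 # Find all indices of the candidate substring in the search string
--                 indices = allMatchesIndices(srch_str, candidate)
--                 # Add the found indices to the fuzzy_indices set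
--                 fuzzy_indices.update(indices)
--     exact_indices = set(allMatchesIndices(srch_str, sub_str))   # Find exact matches
--     result = tuple(sorted(fuzzy_indices - exact_indices))       # Exclude exact matches from the result
--     return result
-- ===== SOURCE B (Python) =====
-- def fuzzyMatchesOnly(srch_str, sub_str):
--     m = len(sub_str)
--     result = []
--     for i in range(len(srch_str) - m + 1):
--         window = srch_str[i:i+m]
--         mismatches = sum(1 for a, b in zip(window, sub_str) if a != b)
--         if mismatches == 1:
--             result.append(i)
--     return tuple(result)
-- ===== Notes on version B (the rewrite author's own statement) =====
-- stated objective: faster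
-- what changed: A generates every one-character-replaced candidate substring (each pattern position x each distinct character of the search string) and runs a full find-all scan for each, then set-subtracts exact matches and sorts; B slides the pattern over each alignment window once and keeps positions whose window has exactly one mismatch, emitting them already deduplicated and in increasing order.
import Mathlib
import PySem

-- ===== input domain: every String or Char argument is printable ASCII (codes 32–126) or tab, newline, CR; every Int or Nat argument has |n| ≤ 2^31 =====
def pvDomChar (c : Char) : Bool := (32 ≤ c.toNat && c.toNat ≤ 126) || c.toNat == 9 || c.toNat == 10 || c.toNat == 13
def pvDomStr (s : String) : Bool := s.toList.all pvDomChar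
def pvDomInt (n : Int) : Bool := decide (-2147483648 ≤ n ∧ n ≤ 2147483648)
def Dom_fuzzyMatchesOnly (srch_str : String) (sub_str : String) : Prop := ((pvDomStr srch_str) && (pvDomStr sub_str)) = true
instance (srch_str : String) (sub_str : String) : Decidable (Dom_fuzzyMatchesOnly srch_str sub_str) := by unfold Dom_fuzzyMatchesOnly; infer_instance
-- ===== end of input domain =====

-- B replaces A's "try every one-character-replaced candidate and search for each"
-- by a single sliding window counting mismatches per alignment; objective: faster (measured).

-- ===== PORT A =====
-- A's helper allMatchesIndices: the while-True find loop; fuel = len(s)+1 bounds the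
-- number of iterations (start strictly increases each round), the value is the same.
def pvAllMatchesLoop (s sub : List Char) (start fuel : Nat) (acc : List Int) : List Int :=
  match fuel with
  | 0 => acc
  | fuel + 1 =>
    let pos := PySem.Chars.findFrom s sub (start : Int) none
    if pos = -1 then acc
    else pvAllMatchesLoop s sub (pos.toNat + 1) fuel (acc ++ [pos])

def pvAllMatchesIndices (s sub : List Char) : List Int :=
  pvAllMatchesLoop s sub 0 (s.length + 1) []

def fuzzyMatchesOnly (srch_str : String) (sub_str : String) : List Int :=
  let s := srch_str.toList
  let sub := sub_str.toList
  let chars : PySem.Set Char := PySem.Set.ofList s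
  let fuzzy : PySem.Set Int :=
    (List.range sub.length).foldl (fun fz i =>
      List.foldl (fun fz c =>
        if c ≠ sub.getD i ' ' then
          PySem.Set.update fz (pvAllMatchesIndices s
            (PySem.List.slice sub none (some (i : Int)) ++ [c] ++
             PySem.List.slice sub (some ((i : Int) + 1)) none))
        else fz) fz chars) PySem.Set.empty
  let exact : PySem.Set Int := PySem.Set.ofList (pvAllMatchesIndices s sub)
  PySem.List.sorted (PySem.Set.diff fuzzy exact) (fun x => x) false

-- ===== PORT B =====
def fuzzyMatchesOnly_alt (srch_str : String) (sub_str : String) : List Int :=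
  let s := srch_str.toList
  let sub := sub_str.toList
  let m := sub.length
  (PySem.List.pyRange 0 ((s.length : Int) - m + 1)).foldl (fun result i =>
    let window := PySem.List.slice s (some i) (some (i + m))
    let mismatches := (window.zip sub).foldl
      (fun acc ab => if ab.1 ≠ ab.2 then acc + 1 else acc) (0 : Int)
    if mismatches = 1 then result ++ [i] else result) []

-- ===== PRECONDITION & SPEC =====
def Spec_fuzzyMatchesOnly (srch_str : String) (sub_str : String) (out : List Int) : Prop := out = fuzzyMatchesOnly_alt srch_str sub_str
instance (srch_str : String) (sub_str : String) (out : List Int) : Decidable (Spec_fuzzyMatchesOnly srch_str sub_str out) := by unfold Spec_fuzzyMatchesOnly; infer_instance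

-- ===== CLAIM (what is proved, stated in full; the proofs are below) =====
def Claim_equal_fuzzyMatchesOnly : Prop := ∀ (srch_str : String) (sub_str : String), Dom_fuzzyMatchesOnly srch_str sub_str → Spec_fuzzyMatchesOnly srch_str sub_str (fuzzyMatchesOnly srch_str sub_str)

-- ===== LEMMAS AND PROOFS =====

-- mismatch count of the length-m window at position p
def pvCnt (s sub : List Char) (p : Nat) : Nat :=
  (List.range sub.length).countP (fun j => !(s.getD (p + j) ' ' == sub.getD j ' '))

theorem pvFindFrom_past (s sub : List Char) :
    PySem.Chars.findFrom s sub ((s.length : Int) + 1) none = -1 := by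
  simp [PySem.Chars.findFrom]
  omega


theorem pvInfix_of_prefix_drop (s sub : List Char) (k p : Nat) (hk : k ≤ p)
    (h : sub <+: s.drop p) : sub <:+: s.drop k := by
  obtain ⟨r, hr⟩ := h
  refine ⟨(s.drop k).take (p - k), r, ?_⟩
  have : s.drop p = (s.drop k).drop (p - k) := by
    rw [List.drop_drop]; congr 1; omega
  rw [this] at hr
  rw [List.append_assoc, hr, List.take_append_drop]


theorem pvAllMatchesLoop_eq (s sub : List Char) :
    ∀ (fuel start : Nat) (acc : List Int),
      start ≤ s.length + 1 → s.length + 1 ≤ start + fuel →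
      pvAllMatchesLoop s sub start fuel acc =
        acc ++ ((List.range (s.length + 1)).filter
          (fun p => decide (start ≤ p ∧ sub <+: s.drop p))).map (Nat.cast : Nat → Int) := by
  intro fuel
  induction fuel with
  | zero =>
    intro start acc h1 h2
    have hs : start = s.length + 1 := by omega
    subst hs
    have hnil : (List.range (s.length + 1)).filter
        (fun p => decide (s.length + 1 ≤ p ∧ sub <+: s.drop p)) = [] := by
      apply List.filter_eq_nil_iff.mpr
      intro p hp
      rw [List.mem_range] at hp
      simp only [decide_eq_true_eq, not_and]
      omega
    rw [pvAllMatchesLoop, hnil]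
    simp
  | succ fuel ih =>
    intro start acc h1 h2
    rw [pvAllMatchesLoop]
    by_cases hs : start = s.length + 1
    · subst hs
      rw [show (((s.length + 1 : Nat) : Int)) = (s.length : Int) + 1 by push_cast; ring]
      rw [pvFindFrom_past, if_pos rfl]
      have hnil : (List.range (s.length + 1)).filter
          (fun p => decide (s.length + 1 ≤ p ∧ sub <+: s.drop p)) = [] := by
        apply List.filter_eq_nil_iff.mpr
        intro p hp
        rw [List.mem_range] at hp
        simp only [decide_eq_true_eq, not_and]
        omega
      rw [hnil]
      simp
    · have hstart : start ≤ s.length := by omega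
      by_cases hneg : PySem.Chars.findFrom s sub (start : Int) none = -1
      · rw [if_pos hneg]
        have hno : ¬ sub <:+: s.drop start :=
          (PySem.Chars.findFrom_natCast_eq_neg_one_iff s sub start hstart).mp hneg
        have hnil : (List.range (s.length + 1)).filter
            (fun p => decide (start ≤ p ∧ sub <+: s.drop p)) = [] := by
          apply List.filter_eq_nil_iff.mpr
          intro p hp
          simp only [decide_eq_true_eq, not_and]
          intro hsp hpre
          exact hno (pvInfix_of_prefix_drop s sub start p hsp hpre)
        rw [hnil]
        simp
      · rw [if_neg hneg]
        obtain ⟨hge, hocc, hmin⟩ :=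
          PySem.Chars.findFrom_natCast_spec s sub start hstart hneg
        set pos := PySem.Chars.findFrom s sub (start : Int) none with hpos
        set q := pos.toNat with hq
        have hstartq : start ≤ q := by omega
        have hposq : pos = (q : Int) := by omega
        have hql : q ≤ s.length := by
          by_contra hgt
          rw [Nat.not_le] at hgt
          have hdrop : s.drop q = [] := List.drop_eq_nil_of_le (by omega)
          rw [hdrop] at hocc
          have hsub : sub = [] := List.prefix_nil.mp hocc
          exact hmin start le_rfl (by omega) (hsub ▸ List.nil_prefix)
        rw [ih (q + 1) (acc ++ [pos]) (by omega) (by omega)]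
        have hsplit : (List.range (s.length + 1)).filter
              (fun p => decide (start ≤ p ∧ sub <+: s.drop p))
            = q :: (List.range (s.length + 1)).filter
              (fun p => decide (q + 1 ≤ p ∧ sub <+: s.drop p)) := by
          have hrange : List.range (s.length + 1)
              = List.range (q + 1) ++ (List.range (s.length - q)).map (fun x => (q + 1) + x) := by
            rw [← List.range_add]
            congr 1
            omega
          rw [hrange, List.filter_append, List.filter_append, List.range_succ,
            List.filter_append, List.filter_append]
          have h1a : (List.range q).filter (fun p => decide (start ≤ p ∧ sub <+: s.drop p)) = [] := by
            apply List.filter_eq_nil_iff.mpr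
            intro p hp
            rw [List.mem_range] at hp
            simp only [decide_eq_true_eq, not_and]
            intro hsp
            exact hmin p hsp (by omega)
          have h1b : (List.range q).filter (fun p => decide (q + 1 ≤ p ∧ sub <+: s.drop p)) = [] := by
            apply List.filter_eq_nil_iff.mpr
            intro p hp
            rw [List.mem_range] at hp
            simp only [decide_eq_true_eq, not_and]
            omega
          have h2a : [q].filter (fun p => decide (start ≤ p ∧ sub <+: s.drop p)) = [q] := by
            simp [hstartq, hocc]
          have h2b : [q].filter (fun p => decide (q + 1 ≤ p ∧ sub <+: s.drop p)) = [] := by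
            simp
          have h3 : ((List.range (s.length - q)).map (fun x => (q + 1) + x)).filter
                (fun p => decide (start ≤ p ∧ sub <+: s.drop p))
              = ((List.range (s.length - q)).map (fun x => (q + 1) + x)).filter
                (fun p => decide (q + 1 ≤ p ∧ sub <+: s.drop p)) := by
            apply List.filter_congr
            intro p hp
            rw [List.mem_map] at hp
            obtain ⟨x, _, rfl⟩ := hp
            simp only [decide_eq_decide]
            constructor
            · rintro ⟨_, hpre⟩; exact ⟨by omega, hpre⟩
            · rintro ⟨_, hpre⟩; exact ⟨by omega, hpre⟩
          rw [h1a, h1b, h2a, h2b, h3]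
          simp
        rw [hsplit]
        simp [hposq]


theorem pvMem_allMatches (s sub : List Char) (x : Int) :
    x ∈ pvAllMatchesIndices s sub ↔ ∃ p : Nat, p ≤ s.length ∧ sub <+: s.drop p ∧ x = (p : Int) := by
  unfold pvAllMatchesIndices
  rw [pvAllMatchesLoop_eq s sub (s.length + 1) 0 [] (by omega) (by omega)]
  rw [List.nil_append, List.mem_map]
  constructor
  · rintro ⟨p, hp, rfl⟩
    rw [List.mem_filter, List.mem_range] at hp
    obtain ⟨hp1, hp2⟩ := hp
    rw [decide_eq_true_eq] at hp2
    exact ⟨p, by omega, hp2.2, rfl⟩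
  · rintro ⟨p, hp, hpre, rfl⟩
    refine ⟨p, ?_, rfl⟩
    rw [List.mem_filter, List.mem_range, decide_eq_true_eq]
    exact ⟨by omega, by omega, hpre⟩

theorem pvCandidate_prefix (s sub : List Char) (p i : Nat) (c : Char) (hi : i < sub.length) :
    (sub.take i ++ c :: sub.drop (i + 1)) <+: s.drop p ↔
      p + sub.length ≤ s.length ∧ s.getD (p + i) ' ' = c ∧
        ∀ j < sub.length, j ≠ i → s.getD (p + j) ' ' = sub.getD j ' ' := by
  have hset : sub.take i ++ c :: sub.drop (i + 1) = sub.set i c := by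
    rw [List.set_eq_take_append_cons_drop, if_pos hi]
  rw [hset, List.prefix_iff_eq_take, List.length_set]
  constructor
  · intro h
    have hlen := congrArg List.length h
    simp only [List.length_set, List.length_take, List.length_drop] at hlen
    have hm : p + sub.length ≤ s.length := by omega
    have key : ∀ j, (hj : j < sub.length) → (if i = j then c else sub[j]) = s[p + j]'(by omega) := by
      intro j hj
      have hx := List.getElem_of_eq h (i := j) (by simp [hj])
      rw [List.getElem_set] at hx
      simp only [List.getElem_take, List.getElem_drop] at hx
      exact hx
    refine ⟨hm, ?_, ?_⟩
    · have hk := key i hi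
      rw [if_pos rfl] at hk
      rw [List.getD_eq_getElem s ' ' (by omega)]
      exact hk.symm
    · intro j hj hne
      have hk := key j hj
      rw [if_neg (fun hh => hne hh.symm)] at hk
      rw [List.getD_eq_getElem s ' ' (by omega), List.getD_eq_getElem sub ' ' hj]
      exact hk.symm
  · rintro ⟨hm, hc, hrest⟩
    apply List.ext_getElem
    · simp; omega
    · intro j hj1 hj2
      simp only [List.length_set] at hj1
      rw [List.getElem_set, List.getElem_take, List.getElem_drop]
      by_cases hji : i = j
      · rw [if_pos hji]
        subst hji
        rw [List.getD_eq_getElem s ' ' (by omega)] at hc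
        exact hc.symm
      · rw [if_neg hji]
        have hr := hrest j hj1 (fun hh => hji hh.symm)
        rw [List.getD_eq_getElem s ' ' (by omega), List.getD_eq_getElem sub ' ' hj1] at hr
        exact hr.symm


theorem pvExists_iff_cnt (s sub : List Char) (p : Nat) :
    (∃ i < sub.length, ∃ c ∈ s, c ≠ sub.getD i ' ' ∧
        (sub.take i ++ c :: sub.drop (i + 1)) <+: s.drop p) ↔
      p + sub.length ≤ s.length ∧ pvCnt s sub p = 1 := by
  constructor
  · rintro ⟨i, hi, c, hcs, hcne, hpre⟩
    obtain ⟨hm, hc, hrest⟩ := (pvCandidate_prefix s sub p i c hi).mp hpre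
    simp only [List.getD_eq_getElem?_getD] at hc hrest hcne
    refine ⟨hm, ?_⟩
    unfold pvCnt
    rw [List.countP_congr (q := fun j => j == i) ?_]
    · rw [← List.count]
      exact List.count_eq_one_of_mem List.nodup_range (List.mem_range.mpr hi)
    · intro j hj
      rw [List.mem_range] at hj
      by_cases hji : j = i
      · subst hji
        simp [hc, hcne]
      · simp [hji, hrest j hj hji]
  · rintro ⟨hm, hcnt⟩
    unfold pvCnt at hcnt
    rw [List.countP_eq_length_filter] at hcnt
    obtain ⟨j0, hfil⟩ := List.length_eq_one_iff.mp hcnt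
    have hj0mem : j0 ∈ (List.range sub.length).filter
        (fun j => !(s.getD (p + j) ' ' == sub.getD j ' ')) := by rw [hfil]; simp
    rw [List.mem_filter, List.mem_range] at hj0mem
    obtain ⟨hj0, hpred⟩ := hj0mem
    refine ⟨j0, hj0, s.getD (p + j0) ' ', ?_, ?_, ?_⟩
    · rw [List.getD_eq_getElem s ' ' (by omega)]
      exact List.getElem_mem _
    · simpa using hpred
    · rw [pvCandidate_prefix s sub p j0 _ hj0]
      refine ⟨hm, rfl, ?_⟩
      intro j hj hne
      by_contra hneq
      have hjmem : j ∈ (List.range sub.length).filter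
          (fun j => !(s.getD (p + j) ' ' == sub.getD j ' ')) := by
        rw [List.mem_filter, List.mem_range]
        exact ⟨hj, by simpa using hneq⟩
      rw [hfil] at hjmem
      simp at hjmem
      exact hne hjmem


theorem pvCnt_ne_exact (s sub : List Char) (p : Nat)
    (h : pvCnt s sub p = 1) : ¬ sub <+: s.drop p := by
  intro hpre
  rw [List.prefix_iff_eq_take] at hpre
  have hlen := congrArg List.length hpre
  simp only [List.length_take, List.length_drop] at hlen
  have hz : pvCnt s sub p = 0 := by
    unfold pvCnt
    rw [List.countP_eq_zero]
    intro j hj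
    rw [List.mem_range] at hj
    have hx := List.getElem_of_eq hpre (i := j) hj
    simp only [List.getElem_take, List.getElem_drop] at hx
    rw [List.getD_eq_getElem s ' ' (by omega), List.getD_eq_getElem sub ' ' hj, ← hx]
    simp
  omega

-- generic: membership in a foldl of set-extending steps
theorem pvMem_foldl_step {α γ : Type} [BEq γ] [LawfulBEq γ]
    (step : PySem.Set γ → α → PySem.Set γ) (Q : α → γ → Prop)
    (h : ∀ s a x, x ∈ step s a ↔ x ∈ s ∨ Q a x) :
    ∀ (l : List α) (s0 : PySem.Set γ) (x : γ),
      x ∈ l.foldl step s0 ↔ x ∈ s0 ∨ ∃ a ∈ l, Q a x := by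
  intro l
  induction l with
  | nil => simp
  | cons a t ih =>
    intro s0 x
    simp only [List.foldl_cons, ih, h, List.mem_cons]
    constructor
    · rintro ((hx | hq) | ⟨b, hb, hq⟩)
      · exact .inl hx
      · exact .inr ⟨a, .inl rfl, hq⟩
      · exact .inr ⟨b, .inr hb, hq⟩
    · rintro (hx | ⟨b, (rfl | hb), hq⟩)
      · exact .inl (.inl hx)
      · exact .inl (.inr hq)
      · exact .inr ⟨b, hb, hq⟩

-- generic: a foldl of nodup-preserving steps preserves Nodup
theorem pvNodup_foldl_step {α γ : Type} (step : List γ → α → List γ)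
    (h : ∀ s a, s.Nodup → (step s a).Nodup) :
    ∀ (l : List α) (s0 : List γ), s0.Nodup → (l.foldl step s0).Nodup := by
  intro l
  induction l with
  | nil => exact fun _ h => h
  | cons a t ih => intro s0 h0; exact ih _ (h _ _ h0)

-- the zipped window, elementwise
theorem pvZip_eq (s sub : List Char) (p : Nat) (h : p + sub.length ≤ s.length) :
    ((s.drop p).take sub.length).zip sub
      = (List.range sub.length).map (fun j => (s.getD (p + j) ' ', sub.getD j ' ')) := by
  apply List.ext_getElem
  · simp
    omega
  · intro j hj1 hj2
    rw [List.getElem_zip, List.getElem_map, List.getElem_range, List.getElem_take,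
      List.getElem_drop]
    rw [List.length_zip, List.length_take, List.length_drop] at hj1
    have hjm : j < sub.length := by omega
    rw [List.getD_eq_getElem s ' ' (by omega), List.getD_eq_getElem sub ' ' hjm]

-- the inner mismatch loop of B computes pvCnt
theorem pvInner_eq (s sub : List Char) (i : Int) (h0 : 0 ≤ i)
    (hm : i.toNat + sub.length ≤ s.length) :
    ((PySem.List.slice s (some i) (some (i + sub.length))).zip sub).foldl
      (fun acc ab => if ab.1 ≠ ab.2 then acc + 1 else acc) (0 : Int)
    = (pvCnt s sub i.toNat : Int) := by
  rw [PySem.List.slice_toNat s h0 (by omega)]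
  have htn : (i + (sub.length : Int)).toNat - i.toNat = sub.length := by omega
  rw [htn, pvZip_eq s sub i.toNat hm]
  rw [PySem.List.foldl_ite_add_one]
  rw [List.countP_map]
  unfold pvCnt
  rw [zero_add]
  congr 1
  apply List.countP_congr
  intro x hx
  simp [Function.comp]

-- membership in A's fuzzy set
theorem pvMem_fuzzy (s sub : List Char) (x : Int) :
    x ∈ (List.range sub.length).foldl (fun fz i =>
        List.foldl (fun fz c =>
          if c ≠ sub.getD i ' ' then
            PySem.Set.update fz (pvAllMatchesIndices s
              (PySem.List.slice sub none (some (i : Int)) ++ [c] ++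
               PySem.List.slice sub (some ((i : Int) + 1)) none))
          else fz) fz (PySem.Set.ofList s)) (PySem.Set.empty : PySem.Set Int)
      ↔ ∃ p : Nat, p + sub.length ≤ s.length ∧ pvCnt s sub p = 1 ∧ x = (p : Int) := by
  have hcand : ∀ (i : Nat) (c : Char),
      PySem.List.slice sub none (some (i : Int)) ++ [c] ++
        PySem.List.slice sub (some ((i : Int) + 1)) none
      = sub.take i ++ c :: sub.drop (i + 1) := by
    intro i c
    rw [PySem.List.slice_to sub (by omega), PySem.List.slice_from sub (by omega)]
    have h1 : ((i : Int)).toNat = i := Int.toNat_natCast i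
    have h2 : (((i : Int) + 1)).toNat = i + 1 := by omega
    rw [h1, h2, List.append_assoc, List.singleton_append]
  have hinner : ∀ (fz : PySem.Set Int) (i : Nat) (x : Int),
      x ∈ List.foldl (fun fz c =>
          if c ≠ sub.getD i ' ' then
            PySem.Set.update fz (pvAllMatchesIndices s
              (PySem.List.slice sub none (some (i : Int)) ++ [c] ++
               PySem.List.slice sub (some ((i : Int) + 1)) none))
          else fz) fz (PySem.Set.ofList s)
      ↔ x ∈ fz ∨ ∃ c ∈ s, c ≠ sub.getD i ' ' ∧
          x ∈ pvAllMatchesIndices s (sub.take i ++ c :: sub.drop (i + 1)) := by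
    intro fz i x
    rw [pvMem_foldl_step _
      (fun c x => c ≠ sub.getD i ' ' ∧
        x ∈ pvAllMatchesIndices s (sub.take i ++ c :: sub.drop (i + 1))) ?_ _ fz x]
    · simp only [PySem.Set.mem_ofList]
    · intro t c y
      split_ifs with hcc
      · rw [PySem.Set.mem_update, hcand i c]
        constructor
        · rintro (hy | hy)
          · exact .inl hy
          · exact .inr ⟨hcc, hy⟩
        · rintro (hy | ⟨_, hy⟩)
          · exact .inl hy
          · exact .inr hy
      · constructor
        · exact .inl
        · rintro (hy | ⟨hne, _⟩)
          · exact hy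
          · exact absurd hne hcc
  rw [pvMem_foldl_step _
    (fun i x => ∃ c ∈ s, c ≠ sub.getD i ' ' ∧
      x ∈ pvAllMatchesIndices s (sub.take i ++ c :: sub.drop (i + 1))) hinner]
  constructor
  · rintro (h0 | ⟨i, hi, c, hcs, hne, hx⟩)
    · simp [PySem.Set.empty] at h0
    · rw [List.mem_range] at hi
      obtain ⟨p, _, hpre, rfl⟩ := (pvMem_allMatches s _ x).mp hx
      obtain ⟨hm1, hc1⟩ := (pvExists_iff_cnt s sub p).mp ⟨i, hi, c, hcs, hne, hpre⟩
      exact ⟨p, hm1, hc1, rfl⟩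
  · rintro ⟨p, hpm, hcnt, rfl⟩
    right
    obtain ⟨i, hi, c, hcs, hne, hpre⟩ := (pvExists_iff_cnt s sub p).mpr ⟨hpm, hcnt⟩
    exact ⟨i, List.mem_range.mpr hi, c, hcs, hne,
      (pvMem_allMatches s _ _).mpr ⟨p, by omega, hpre, rfl⟩⟩

theorem fuzzy_eq (srch_str sub_str : String) :
    fuzzyMatchesOnly srch_str sub_str = fuzzyMatchesOnly_alt srch_str sub_str := by
  simp only [fuzzyMatchesOnly, fuzzyMatchesOnly_alt]
  rw [PySem.List.foldl_append_ite_eq_filter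
    (fun i => ((PySem.List.slice srch_str.toList (some i)
        (some (i + (sub_str.toList.length : Int)))).zip sub_str.toList).foldl
      (fun acc ab => if ab.1 ≠ ab.2 then acc + 1 else acc) (0 : Int) = 1)]
  rw [List.nil_append]
  have hpw : ((PySem.List.pyRange 0 ((srch_str.toList.length : Int) - sub_str.toList.length + 1)).filter
      (fun i => decide (((PySem.List.slice srch_str.toList (some i)
          (some (i + (sub_str.toList.length : Int)))).zip sub_str.toList).foldl
        (fun acc ab => if ab.1 ≠ ab.2 then acc + 1 else acc) (0 : Int) = 1))).Pairwise (· < ·) :=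
    (PySem.List.pairwise_lt_pyRange_one 0 _).filter _
  apply PySem.List.sorted_eq_of_perm_of_pairwise_lt _ _ _ ?_ hpw
  have hfznd : ((List.range sub_str.toList.length).foldl (fun fz i =>
      List.foldl (fun fz c =>
        if c ≠ sub_str.toList.getD i ' ' then
          PySem.Set.update fz (pvAllMatchesIndices srch_str.toList
            (PySem.List.slice sub_str.toList none (some (i : Int)) ++ [c] ++
             PySem.List.slice sub_str.toList (some ((i : Int) + 1)) none))
        else fz) fz (PySem.Set.ofList srch_str.toList)) (PySem.Set.empty : PySem.Set Int)).Nodup := by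
    apply pvNodup_foldl_step _ ?_ _ _ List.nodup_nil
    intro t i ht
    apply pvNodup_foldl_step _ ?_ _ _ ht
    intro t' c ht'
    split_ifs with hcc
    · exact PySem.Set.nodup_update _ _ ht'
    · exact ht'
  rw [List.perm_ext_iff_of_nodup (List.Pairwise.imp ne_of_lt hpw)
    (PySem.Set.nodup_diff _ _ hfznd)]
  intro a
  rw [List.mem_filter, PySem.List.mem_pyRange_one, PySem.Set.mem_diff, pvMem_fuzzy,
    decide_eq_true_eq]
  constructor
  · rintro ⟨⟨h0, hlt⟩, hcond⟩
    have hpm : a.toNat + sub_str.toList.length ≤ srch_str.toList.length := by omega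
    rw [pvInner_eq srch_str.toList sub_str.toList a h0 hpm] at hcond
    have hcnt : pvCnt srch_str.toList sub_str.toList a.toNat = 1 := by exact_mod_cast hcond
    refine ⟨⟨a.toNat, hpm, hcnt, by omega⟩, ?_⟩
    intro hex
    rw [PySem.Set.mem_ofList] at hex
    obtain ⟨p', _, hpre', hap⟩ := (pvMem_allMatches srch_str.toList sub_str.toList a).mp hex
    have hpa : p' = a.toNat := by omega
    subst hpa
    exact pvCnt_ne_exact _ _ _ hcnt hpre'
  · rintro ⟨⟨p, hpm, hcnt, rfl⟩, _⟩
    refine ⟨⟨by omega, by omega⟩, ?_⟩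
    rw [pvInner_eq srch_str.toList sub_str.toList (p : Int) (by omega)
      (by rw [Int.toNat_natCast]; exact hpm)]
    rw [Int.toNat_natCast]
    exact_mod_cast congrArg (Nat.cast : Nat → Int) hcnt

-- ===== VERDICT (by name: the statement is the Claim_ definition above) =====
theorem fuzzyMatchesOnly_spec : Claim_equal_fuzzyMatchesOnly := by
  intro srch_str sub_str _
  unfold Spec_fuzzyMatchesOnly
  exact fuzzy_eq srch_str sub_str
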